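-- pv_equiv track=rewrite | github.com/Kevenny/Analisador_javalog | java-dump-analyzer/analyzer/parsers/heap_parser.py | _decode_class_name
-- ===== SOURCE A (Python) =====
-- def _decode_class_name(raw: str) -> str:
--     """Converte nome interno JVM (ex: Ljava/lang/String;) para formato legível."""
--     if not raw:
--         return 'desconhecido'
--     dims = 0
--     while raw.startswith('['):
--         dims += 1
--         raw = raw[1:]
--     type_map = {
--         'B': 'byte', 'C': 'char', 'D': 'double', 'F': 'float',
--         'I': 'int',  'J': 'long', 'S': 'short',  'Z': 'boolean',
--     }
--     if raw in type_map:
--         name = type_map[raw]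
--     elif raw.startswith('L') and raw.endswith(';'):
--         name = raw[1:-1].replace('/', '.')
--     else:
--         name = raw.replace('/', '.')
--     return name + '[]' * dims
-- ===== SOURCE B (Python) =====
-- _TYPE_MAP = {
--     'B': 'byte', 'C': 'char', 'D': 'double', 'F': 'float',
--     'I': 'int',  'J': 'long', 'S': 'short',  'Z': 'boolean',
-- }
--
--
-- def _decode(raw: str) -> str:
--     """Recursively decode: each leading '[' adds one '[]' suffix."""
--     if raw.startswith('['):
--         return _decode(raw[1:]) + '[]'
--     t = _TYPE_MAP.get(raw)
--     if t is not None: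
--         return t
--     if raw.startswith('L') and raw.endswith(';'):
--         raw = raw[1:-1]
--     return raw.replace('/', '.')
--
--
-- def _decode_class_name(raw: str) -> str:
--     """Converte nome interno JVM (ex: Ljava/lang/String;) para formato legível."""
--     if not raw:
--         return 'desconhecido'
--     return _decode(raw)
-- ===== Notes on version B (the rewrite author's own statement) =====
-- stated objective: simpler
-- what changed: Replaces the dims-counting while-loop plus '[]'*dims string multiplication with a single recursion over the nested array descriptor that appends '[]' per level, and flattens the elif/else name branches into a fall-through that strips 'L...;' and applies one shared replace.
import Mathlib
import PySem

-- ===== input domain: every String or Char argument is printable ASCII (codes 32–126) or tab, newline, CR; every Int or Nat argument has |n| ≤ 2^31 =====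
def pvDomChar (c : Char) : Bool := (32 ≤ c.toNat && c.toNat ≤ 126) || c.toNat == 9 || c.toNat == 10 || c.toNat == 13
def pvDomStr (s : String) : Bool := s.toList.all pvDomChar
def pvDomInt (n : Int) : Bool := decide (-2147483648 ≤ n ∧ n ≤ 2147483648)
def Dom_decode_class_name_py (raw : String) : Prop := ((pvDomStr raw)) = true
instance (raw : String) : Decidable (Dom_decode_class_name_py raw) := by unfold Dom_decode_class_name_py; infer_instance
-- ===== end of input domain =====

-- B decodes the JVM descriptor by recursing on the nested array structure (one '[]' suffix
-- per recursion level) instead of A's dims-counting while-loop plus '[]'*dims, and flattens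
-- A's elif/else name branches into a fall-through; objective: simpler.

-- ===== PORT A =====
-- shared constant: the type_map dict literal of the Python source
def pvTypeMap : PySem.Dict (List Char) (List Char) :=
  PySem.Dict.ofList
  [("B".toList, "byte".toList), ("C".toList, "char".toList),
   ("D".toList, "double".toList), ("F".toList, "float".toList),
   ("I".toList, "int".toList), ("J".toList, "long".toList),
   ("S".toList, "short".toList), ("Z".toList, "boolean".toList)]

-- while raw.startswith('['): dims += 1; raw = raw[1:]   (startswith on the 1-char prefix '[' = head test)
def pvStripA : List Char → Nat × List Char
  | [] => (0, [])
  | c :: rest =>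
    if c = '[' then
      let p := pvStripA rest
      (p.1 + 1, p.2)
    else (0, c :: rest)

-- '[]' * dims
def pvRepeat (s : List Char) : Nat → List Char
  | 0 => []
  | n + 1 => s ++ pvRepeat s n

-- the if raw in type_map / elif / else block computing `name`
def pvNameA (s : List Char) : List Char :=
  match PySem.Dict.get? pvTypeMap s with
  | some n => n
  | none =>
    if PySem.Chars.startswith s "L".toList && PySem.Chars.endswith s ";".toList then
      PySem.Chars.replace (PySem.Chars.slice s (some 1) (some (-1))) "/".toList ".".toList
    else
      PySem.Chars.replace s "/".toList ".".toList

def decode_class_name_py (raw : String) : String :=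
  if raw.toList = [] then "desconhecido"
  else
    let p := pvStripA raw.toList
    String.ofList (pvNameA p.2 ++ pvRepeat "[]".toList p.1)

-- ===== PORT B =====
-- helper _decode: recursion on the array nesting, fall-through base case
def pvDecodeB : List Char → List Char
  | [] =>
    PySem.Chars.replace [] "/".toList ".".toList
  | c :: rest =>
    if c = '[' then
      pvDecodeB rest ++ "[]".toList
    else
      match PySem.Dict.get? pvTypeMap (c :: rest) with
      | some t => t
      | none =>
        let s :=
          if PySem.Chars.startswith (c :: rest) "L".toList &&
             PySem.Chars.endswith (c :: rest) ";".toList then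
            PySem.Chars.slice (c :: rest) (some 1) (some (-1))
          else c :: rest
        PySem.Chars.replace s "/".toList ".".toList

def decode_class_name_py_alt (raw : String) : String :=
  if raw.toList = [] then "desconhecido" else String.ofList (pvDecodeB raw.toList)

-- ===== PRECONDITION & SPEC =====
def Spec_decode_class_name_py (raw : String) (out : String) : Prop := out = decode_class_name_py_alt raw
instance (raw : String) (out : String) : Decidable (Spec_decode_class_name_py raw out) := by unfold Spec_decode_class_name_py; infer_instance

-- ===== CLAIM (what is proved, stated in full; the proofs are below) =====
def Claim_equal_decode_class_name_py : Prop := ∀ (raw : String), Dom_decode_class_name_py raw → Spec_decode_class_name_py raw (decode_class_name_py raw)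

-- ===== LEMMAS AND PROOFS =====

theorem pvRepeat_comm (s : List Char) (n : Nat) :
    pvRepeat s n ++ s = s ++ pvRepeat s n := by
  induction n with
  | zero => simp [pvRepeat]
  | succ n ih => simp only [pvRepeat, List.append_assoc, ih]

-- for a non-'['-headed (or empty) list, B's base case equals A's name computation
theorem pvDecodeB_base (s : List Char) (h : ∀ c rest, s = c :: rest → c ≠ '[') :
    pvDecodeB s = pvNameA s := by
  match s with
  | [] => rfl
  | c :: rest =>
    have hc : c ≠ '[' := h c rest rfl
    simp only [pvDecodeB, if_neg hc, pvNameA]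
    cases PySem.Dict.get? pvTypeMap (c :: rest) with
    | some t => rfl
    | none => split_ifs <;> rfl

-- main invariant: the recursion equals stripped base name plus one '[]' per stripped bracket
theorem pvDecodeB_eq (s : List Char) :
    pvDecodeB s = pvNameA (pvStripA s).2 ++ pvRepeat "[]".toList (pvStripA s).1 := by
  induction s with
  | nil => simp [pvStripA, pvRepeat, pvDecodeB_base]
  | cons c rest ih =>
    by_cases hc : c = '['
    · subst hc
      simp [pvDecodeB, pvStripA, pvRepeat, ih, List.append_assoc]
      rw [pvRepeat_comm]
      rfl
    · rw [pvDecodeB_base (c :: rest) (by intro a b hab; cases hab; exact hc)]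
      simp [pvStripA, if_neg hc, pvRepeat]

-- ===== VERDICT (by name: the statement is the Claim_ definition above) =====
theorem decode_class_name_py_spec : Claim_equal_decode_class_name_py := by
  intro raw _
  unfold Spec_decode_class_name_py decode_class_name_py decode_class_name_py_alt
  by_cases h : raw.toList = []
  · simp [h]
  · simp only [if_neg h, pvDecodeB_eq]
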